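-- pv_equiv track=rewrite | github.com/yeojeongkim/009 | recipes.py | make_recipe_book
-- ===== SOURCE A (Python) =====
-- def make_recipe_book(recipes):
--     """
--     Given recipes, a list containing compound and atomic food items, make and
--     return a dictionary that maps each compound food item name to a list
--     of all the ingredient lists associated with that name.
--     """
--     recipe_dict = {}
--     for tup in recipes:
--         if tup[0] == "compound":
--             recipe_dict[tup[1]] = []
--     for tup in recipes:
--         if tup[1] not in recipe_dict:
--             continue
--         recipe_dict[tup[1]].append(list(tup[2]))
--     return recipe_dict
-- ===== SOURCE B (Python) =====
-- def make_recipe_book(recipes):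
--     """
--     Given recipes, a list containing compound and atomic food items, make and
--     return a dictionary that maps each compound food item name to a list
--     of all the ingredient lists associated with that name.
--     """
--     groups = {}
--     compounds = []
--     for kind, name, ingredients in recipes:
--         groups.setdefault(name, []).append(list(ingredients))
--         if kind == "compound" and name not in compounds:
--             compounds.append(name)
--     return {name: groups.get(name, []) for name in compounds}
-- ===== Notes on version B (the rewrite author's own statement) =====
-- stated objective: alternative
-- what changed: Single pass building a full name->ingredient-lists index plus an ordered list of compound names, then a final selection, instead of A's two scans (pre-seed compound keys, then filtered append).
import Mathlib
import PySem

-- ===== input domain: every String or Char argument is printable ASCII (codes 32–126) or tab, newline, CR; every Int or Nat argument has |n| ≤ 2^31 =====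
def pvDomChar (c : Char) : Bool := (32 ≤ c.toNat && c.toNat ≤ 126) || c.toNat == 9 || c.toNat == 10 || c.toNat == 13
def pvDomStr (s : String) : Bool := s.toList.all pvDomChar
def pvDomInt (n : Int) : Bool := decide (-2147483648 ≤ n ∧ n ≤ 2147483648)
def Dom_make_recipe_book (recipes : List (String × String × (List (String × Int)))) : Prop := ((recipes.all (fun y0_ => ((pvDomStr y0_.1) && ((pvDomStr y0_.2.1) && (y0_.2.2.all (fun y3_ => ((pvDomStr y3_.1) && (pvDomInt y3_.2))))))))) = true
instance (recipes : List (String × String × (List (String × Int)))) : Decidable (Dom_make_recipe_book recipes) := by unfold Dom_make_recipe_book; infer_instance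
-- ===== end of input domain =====

-- B builds one pass: a full name->ingredient-lists index plus the ordered compound-name list, then selects; same results as A's two filtered scans (alternative decomposition, no speed claim).


-- ===== PORT A =====
def make_recipe_book (recipes : List (String × String × (List (String × Int)))) : List (String × List (List (String × Int))) :=
  -- recipe_dict = {}; first loop: seed compound names with []
  let d1 : PySem.Dict String (List (List (String × Int))) :=
    recipes.foldl (fun d t => if t.1 == "compound" then d.insert t.2.1 [] else d) PySem.Dict.empty
  -- second loop: append list(tup[2]) whenever tup[1] is a key
  let d2 :=
    recipes.foldl (fun d t => if d.contains t.2.1 then d.modify t.2.1 [] (fun ls => ls ++ [t.2.2]) else d) d1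
  d2.items

-- ===== PORT B =====
def make_recipe_book_alt (recipes : List (String × String × (List (String × Int)))) : List (String × List (List (String × Int))) :=
  -- one pass: groups.setdefault(name, []).append(list(ingredients)); compounds collects new compound names
  let st :=
    recipes.foldl
      (fun (st : PySem.Dict String (List (List (String × Int))) × List String) t =>
        (st.1.modify t.2.1 [] (fun ls => ls ++ [t.2.2]),
         if t.1 == "compound" && !(st.2.contains t.2.1) then st.2 ++ [t.2.1] else st.2))
      (PySem.Dict.empty, [])
  -- {name: groups.get(name, []) for name in compounds}
  st.2.map (fun n => (n, st.1.getD n []))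

-- ===== PRECONDITION & SPEC =====
def Spec_make_recipe_book (recipes : List (String × String × (List (String × Int)))) (out : List (String × List (List (String × Int)))) : Prop := out = make_recipe_book_alt recipes
instance (recipes : List (String × String × (List (String × Int)))) (out : List (String × List (List (String × Int)))) : Decidable (Spec_make_recipe_book recipes out) := by unfold Spec_make_recipe_book; infer_instance

-- ===== CLAIM (what is proved, stated in full; the proofs are below) =====
def Claim_equal_make_recipe_book : Prop := ∀ (recipes : List (String × String × (List (String × Int)))), Dom_make_recipe_book recipes → Spec_make_recipe_book recipes (make_recipe_book recipes)

-- ===== LEMMAS AND PROOFS =====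

-- a fold whose step is guarded by a dict-independent predicate is a fold over the filtered list
theorem pv_foldl_ite_filter {α δ : Type} (l : List α) (P : α → Bool) (f : δ → α → δ) (d : δ) :
    l.foldl (fun d t => if P t then f d t else d) d = (l.filter P).foldl f d := by
  induction l generalizing d with
  | nil => rfl
  | cons t l ih =>
    by_cases h : P t = true <;> simp [List.foldl, List.filter, h, ih]

-- the pair fold of B splits into its two independent component folds
theorem pv_foldl_prod {α β γ : Type} (l : List α) (f : β → α → β) (g : γ → α → γ) (a : β) (b : γ) :
    l.foldl (fun st t => (f st.1 t, g st.2 t)) (a, b) = (l.foldl f a, l.foldl g b) := by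
  induction l generalizing a b with
  | nil => rfl
  | cons t l ih => simp [List.foldl, ih]

-- modifying an already-present key does not change which keys are present
theorem pv_contains_modify_of_contains (d : PySem.Dict String (List (List (String × Int))))
    (k : String) (h : d.contains k = true) (f : List (List (String × Int)) → List (List (String × Int))) (k' : String) :
    (d.modify k [] f).contains k' = d.contains k' := by
  rw [PySem.Dict.contains_modify]
  by_cases hk : k' = k
  · simp [hk, h]
  · simp [hk]

-- A's second loop equals a plain modify-fold over the tuples whose name is a key of the initial dict
theorem pv_foldA2 (l : List (String × String × (List (String × Int)))) (d : PySem.Dict String (List (List (String × Int)))) :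
    l.foldl (fun d t => if d.contains t.2.1 then d.modify t.2.1 [] (fun ls => ls ++ [t.2.2]) else d) d
      = (l.filter (fun t => d.contains t.2.1)).foldl (fun d t => d.modify t.2.1 [] (fun ls => ls ++ [t.2.2])) d := by
  induction l generalizing d with
  | nil => rfl
  | cons t l ih =>
    by_cases h : d.contains t.2.1 = true
    · simp only [List.foldl, List.filter, h, if_pos]
      rw [ih]
      have hf : l.filter (fun t' => (d.modify t.2.1 [] (fun ls => ls ++ [t.2.2])).contains t'.2.1)
          = l.filter (fun t' => d.contains t'.2.1) :=
        List.filter_congr (fun x _ => pv_contains_modify_of_contains d t.2.1 h _ x.2.1)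
      rw [hf]
    · simp only [List.foldl, List.filter, h, if_neg, Bool.false_eq_true, not_false_iff]
      simp only [Bool.not_eq_true] at h
      simp [ih]

-- a modify-fold over tuples whose names are already keys preserves the key list
theorem pv_keys_foldl_fmod (l : List (String × String × (List (String × Int)))) (d : PySem.Dict String (List (List (String × Int))))
    (h : ∀ t ∈ l, d.contains t.2.1 = true) :
    (l.foldl (fun d t => d.modify t.2.1 [] (fun ls => ls ++ [t.2.2])) d).keys = d.keys := by
  induction l generalizing d with
  | nil => rfl
  | cons t l ih =>
    have ht := h t (List.mem_cons_self ..)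
    simp only [List.foldl]
    rw [ih _ (fun x hx => by rw [pv_contains_modify_of_contains d t.2.1 ht]; exact h x (List.mem_cons_of_mem _ hx))]
    rw [PySem.Dict.keys_modify, PySem.Dict.keys_insert_of_contains _ _ ht]

-- a dict with nodup keys is the key list paired with the looked-up values
theorem pv_items_eq_map_keys (d : PySem.Dict String (List (List (String × Int)))) (hn : d.keys.Nodup) :
    d.items = d.keys.map (fun k => (k, d.getD k [])) := by
  obtain ⟨ps⟩ := d
  rw [PySem.Dict.keys_mk] at *
  rw [List.map_map]
  symm
  calc ps.map (fun p => (p.1, PySem.Dict.getD ⟨ps⟩ p.1 []))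
      = ps.map id := List.map_congr_left (fun p hp => by
        rw [PySem.Dict.getD_of_mem_items ⟨ps⟩ (by simpa using hp) (by simpa [PySem.Dict.keys_mk] using hn)]
        rfl)
    _ = ps := List.map_id ps

-- every default-[] lookup in the seed fold (inserting []) is []
theorem pv_getD_seed (names : List String) (d : PySem.Dict String (List (List (String × Int))))
    (h : ∀ k, d.getD k [] = []) (n : String) :
    (names.foldl (fun d x => d.insert x []) d).getD n [] = [] := by
  induction names generalizing d with
  | nil => exact h n
  | cons x names ih =>
    simp only [List.foldl]
    exact ih _ (fun k => by rw [PySem.Dict.getD_insert]; split <;> simp [h])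

-- B's compound-collecting fold is Set.add folded over the compound names
theorem pv_comps_fold (l : List (String × String × (List (String × Int)))) (c : List String) :
    l.foldl (fun c t => if t.1 == "compound" && !(c.contains t.2.1) then c ++ [t.2.1] else c) c
      = ((l.filter (fun t => t.1 == "compound")).map (fun t => t.2.1)).foldl PySem.Set.add c := by
  induction l generalizing c with
  | nil => rfl
  | cons t l ih =>
    by_cases h : (t.1 == "compound") = true
    · simp only [List.filter_cons, h, if_true, List.map_cons, List.foldl_cons]
      have hstep : (if (true && !(c.contains t.2.1)) = true then c ++ [t.2.1] else c)
          = PySem.Set.add c t.2.1 := by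
        unfold PySem.Set.add
        rw [show PySem.Set.contains c t.2.1 = c.contains t.2.1 from rfl]
        cases hc : c.contains t.2.1 <;> simp
      rw [hstep, ih]
    · simp only [List.filter_cons, h, Bool.false_eq_true, if_false, List.foldl_cons]
      have hstep : (if (false && !(c.contains t.2.1)) = true then c ++ [t.2.1] else c) = c := by
        simp
      rw [hstep, ih]

-- shared right-hand side: the ingredient lists grouped under n, in recipe order
theorem pv_getD_group (recipes : List (String × String × (List (String × Int)))) (d : PySem.Dict String (List (List (String × Int)))) (n : String) :
    (recipes.foldl (fun d t => d.modify t.2.1 [] (fun ls => ls ++ [t.2.2])) d).getD n []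
      = d.getD n [] ++ (recipes.filter (fun t => t.2.1 == n)).map (fun t => t.2.2) := by
  have h1 : recipes.foldl (fun d t => d.modify t.2.1 [] (fun ls => ls ++ [t.2.2])) d
      = (recipes.map (fun t => t.2)).foldl (fun d p => d.modify p.1 [] (fun ls => ls ++ [p.2])) d := by
    rw [List.foldl_map]
  rw [h1, PySem.Dict.getD_foldl_modify_append, List.filter_map, List.map_map]
  rfl

-- ===== VERDICT (by name: the statement is the Claim_ definition above) =====
theorem make_recipe_book_spec : Claim_equal_make_recipe_book := by
  intro recipes _
  unfold Spec_make_recipe_book make_recipe_book make_recipe_book_alt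
  simp only
  -- names of compound tuples, in order
  set names := (recipes.filter (fun t => t.1 == "compound")).map (fun t => t.2.1) with hnames
  -- A's first loop
  set d1 := recipes.foldl (fun d t => if t.1 == "compound" then d.insert t.2.1 [] else d)
      (PySem.Dict.empty : PySem.Dict String (List (List (String × Int)))) with hd1
  have hd1' : d1 = names.foldl (fun d x => d.insert x []) PySem.Dict.empty := by
    rw [hd1, pv_foldl_ite_filter, hnames, List.foldl_map]
  have hkeys1 : d1.keys = PySem.Set.ofList names := by
    rw [hd1']
    have := PySem.Dict.keys_foldl_insert names
      (fun (_ : PySem.Dict String (List (List (String × Int)))) (_ : String) => ([] : List (List (String × Int))))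
      PySem.Dict.empty
    simpa [PySem.Dict.keys_empty, PySem.Set.update, PySem.Set.ofList] using this
  have hgetD1 : ∀ n, d1.getD n [] = [] := by
    intro n
    rw [hd1']
    exact pv_getD_seed names _ (fun k => PySem.Dict.getD_empty k []) n
  have hnodup : d1.keys.Nodup := by rw [hkeys1]; exact PySem.Set.nodup_ofList names
  -- A's second loop
  set d2 := recipes.foldl (fun d t => if d.contains t.2.1 then d.modify t.2.1 [] (fun ls => ls ++ [t.2.2]) else d) d1 with hd2
  have hd2' : d2 = (recipes.filter (fun t => d1.contains t.2.1)).foldl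
      (fun d t => d.modify t.2.1 [] (fun ls => ls ++ [t.2.2])) d1 := pv_foldA2 recipes d1
  have hkeys2 : d2.keys = d1.keys := by
    rw [hd2']
    exact pv_keys_foldl_fmod _ d1 (fun t ht => (List.mem_filter.mp ht).2)
  -- B's fold splits
  have hsplit : (recipes.foldl
      (fun (st : PySem.Dict String (List (List (String × Int))) × List String) t =>
        (st.1.modify t.2.1 [] (fun ls => ls ++ [t.2.2]),
         if t.1 == "compound" && !(st.2.contains t.2.1) then st.2 ++ [t.2.1] else st.2))
      (PySem.Dict.empty, []))
      = (recipes.foldl (fun d t => d.modify t.2.1 [] (fun ls => ls ++ [t.2.2])) PySem.Dict.empty,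
         recipes.foldl (fun c t => if t.1 == "compound" && !(c.contains t.2.1) then c ++ [t.2.1] else c) []) :=
    pv_foldl_prod recipes (fun d t => d.modify t.2.1 [] (fun ls => ls ++ [t.2.2]))
      (fun c t => if t.1 == "compound" && !(c.contains t.2.1) then c ++ [t.2.1] else c)
      PySem.Dict.empty []
  rw [hsplit, pv_comps_fold]
  -- B's value lists
  have hB : ∀ n, (recipes.foldl (fun d t => d.modify t.2.1 [] (fun ls => ls ++ [t.2.2]))
      (PySem.Dict.empty : PySem.Dict String (List (List (String × Int))))).getD n []
      = (recipes.filter (fun t => t.2.1 == n)).map (fun t => t.2.2) := by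
    intro n
    rw [pv_getD_group, PySem.Dict.getD_empty]
    rfl
  -- A's items as a map over its keys
  have hitems : d2.items = (PySem.Set.ofList names).map (fun n => (n, d2.getD n [])) := by
    rw [pv_items_eq_map_keys d2 (by rw [hkeys2]; exact hnodup), hkeys2, hkeys1]
  rw [hitems]
  apply List.map_congr_left
  intro n hn
  have hcont : d1.contains n = true := by
    rw [PySem.Dict.contains_iff_mem_keys, hkeys1]; exact hn
  have hval : d2.getD n [] = (recipes.filter (fun t => t.2.1 == n)).map (fun t => t.2.2) := by
    rw [hd2', pv_getD_group, hgetD1, List.filter_filter]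
    have : recipes.filter (fun t => (t.2.1 == n) && d1.contains t.2.1)
        = recipes.filter (fun t => t.2.1 == n) := by
      apply List.filter_congr
      intro t _
      by_cases ht : t.2.1 = n
      · simp [ht, hcont]
      · simp [ht]
    rw [this]
    rfl
  rw [hval, hB n]
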